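-- pv_equiv track=rewrite | github.com/Spansos/AoC2023 | day_6/part_2/main.py | calc
-- ===== SOURCE A (Python) =====
-- def does_win( timepress, time, dist ):
--     return timepress * (time-timepress) > dist
--
-- def calc( mintime, maxtime, time, dist ):
--     half = (mintime + maxtime) // 2
--     if mintime == half or maxtime == half:
--         if does_win( maxtime, time, dist ):
--             return maxtime
--         else:
--             return mintime
--     if does_win( half, time, dist ):
--         return calc( half, maxtime, time, dist )
--     else:
--         return calc( mintime, half, time, dist )
-- ===== SOURCE B (Python) =====
-- def calc(mintime, maxtime, time, dist):
--     # iterative binary search: same midpoint and strict '>' test, loop instead of recursion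
--     lo, hi = mintime, maxtime
--     while True:
--         half = (lo + hi) // 2
--         if half == lo or half == hi:
--             return hi if hi * (time - hi) > dist else lo
--         if half * (time - half) > dist:
--             lo = half
--         else:
--             hi = half
-- ===== Notes on version B (the rewrite author's own statement) =====
-- stated objective: alternative
-- what changed: Replaced the recursive binary search (with a does_win helper) by an iterative while-loop maintaining lo/hi with the comparison inlined; same midpoint and strict '>' semantics.
import Mathlib
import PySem

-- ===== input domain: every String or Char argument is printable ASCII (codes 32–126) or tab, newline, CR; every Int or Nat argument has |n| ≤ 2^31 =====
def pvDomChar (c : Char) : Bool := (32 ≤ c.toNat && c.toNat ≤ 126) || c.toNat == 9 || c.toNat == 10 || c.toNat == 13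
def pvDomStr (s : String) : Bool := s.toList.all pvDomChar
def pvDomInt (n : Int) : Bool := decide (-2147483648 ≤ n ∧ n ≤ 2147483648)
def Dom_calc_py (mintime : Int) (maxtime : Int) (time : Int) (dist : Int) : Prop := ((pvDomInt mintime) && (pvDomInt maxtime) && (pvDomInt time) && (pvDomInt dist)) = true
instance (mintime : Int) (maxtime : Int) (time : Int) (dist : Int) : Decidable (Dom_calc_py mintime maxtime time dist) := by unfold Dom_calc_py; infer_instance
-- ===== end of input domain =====

-- B rewrites A's recursive binary search (with its does_win helper) as an iterative lo/hi loop with the comparison inlined; same return value.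
-- Both ports carry a Nat fuel of (maxtime-mintime).natAbs + 1 purely as a structural-termination
-- guard (the midpoint step shrinks |hi - lo|, so the recursion depth never exceeds the starting fuel).

-- ===== PORT A =====
def does_win_py (timepress : Int) (time : Int) (dist : Int) : Bool :=
  timepress * (time - timepress) > dist

def calcGo (fuel : Nat) (mintime : Int) (maxtime : Int) (time : Int) (dist : Int) : Int :=
  match fuel with
  | 0 => mintime  -- never reached: fuel starts above |maxtime - mintime|, which strictly decreases
  | fuel + 1 =>
    let half := PySem.Int.floordiv (mintime + maxtime) 2
    if mintime = half ∨ maxtime = half then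
      if does_win_py maxtime time dist then maxtime else mintime
    else if does_win_py half time dist then calcGo fuel half maxtime time dist
    else calcGo fuel mintime half time dist

def calc_py (mintime : Int) (maxtime : Int) (time : Int) (dist : Int) : Int :=
  calcGo ((maxtime - mintime).natAbs + 1) mintime maxtime time dist

-- ===== PORT B =====
-- B's while-True loop ported as a tail-recursive step function over the loop state (lo, hi), with the same fuel guard.
def calcLoop (fuel : Nat) (time : Int) (dist : Int) (lo : Int) (hi : Int) : Int :=
  match fuel with
  | 0 => lo  -- never reached, as above
  | fuel + 1 =>
    let half := PySem.Int.floordiv (lo + hi) 2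
    if half = lo ∨ half = hi then
      if hi * (time - hi) > dist then hi else lo
    else if half * (time - half) > dist then calcLoop fuel time dist half hi
    else calcLoop fuel time dist lo half

def calc_py_alt (mintime : Int) (maxtime : Int) (time : Int) (dist : Int) : Int :=
  calcLoop ((maxtime - mintime).natAbs + 1) time dist mintime maxtime

-- ===== PRECONDITION & SPEC =====
def Spec_calc_py (mintime : Int) (maxtime : Int) (time : Int) (dist : Int) (out : Int) : Prop := out = calc_py_alt mintime maxtime time dist
instance (mintime : Int) (maxtime : Int) (time : Int) (dist : Int) (out : Int) : Decidable (Spec_calc_py mintime maxtime time dist out) := by unfold Spec_calc_py; infer_instance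

-- ===== CLAIM (what is proved, stated in full; the proofs are below) =====
def Claim_equal_calc_py : Prop := ∀ (mintime : Int) (maxtime : Int) (time : Int) (dist : Int), Dom_calc_py mintime maxtime time dist → Spec_calc_py mintime maxtime time dist (calc_py mintime maxtime time dist)

-- ===== LEMMAS AND PROOFS =====
-- step for step, the fueled recursions of A and B coincide (B's edge test and inlined comparison are A's, commuted)
theorem calcGo_eq_calcLoop (fuel : Nat) (mintime maxtime time dist : Int) :
    calcGo fuel mintime maxtime time dist = calcLoop fuel time dist mintime maxtime := by
  induction fuel generalizing mintime maxtime with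
  | zero => rfl
  | succ fuel ih =>
    simp only [calcGo, calcLoop, does_win_py, decide_eq_true_eq]
    by_cases hEdge : mintime = PySem.Int.floordiv (mintime + maxtime) 2 ∨ maxtime = PySem.Int.floordiv (mintime + maxtime) 2
    · have hEdge' : PySem.Int.floordiv (mintime + maxtime) 2 = mintime ∨ PySem.Int.floordiv (mintime + maxtime) 2 = maxtime := by tauto
      rw [if_pos hEdge, if_pos hEdge']
    · have hEdge' : ¬(PySem.Int.floordiv (mintime + maxtime) 2 = mintime ∨ PySem.Int.floordiv (mintime + maxtime) 2 = maxtime) := by tauto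
      rw [if_neg hEdge, if_neg hEdge']
      split_ifs with hWin
      · exact ih _ _
      · exact ih _ _

-- ===== VERDICT (by name: the statement is the Claim_ definition above) =====
theorem calc_py_spec : Claim_equal_calc_py := by
  intro mintime maxtime time dist _
  unfold Spec_calc_py calc_py_alt calc_py
  exact calcGo_eq_calcLoop _ mintime maxtime time dist
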